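-- pv_equiv track=rewrite | github.com/Ensembl/ensembl-compara | src/python/lib/ensembl/compara/utils/cigar.py | aligned_seq_to_cigar
-- ===== SOURCE A (Python) =====
-- def aligned_seq_to_cigar(aligned_seq: str) -> str:
--     """Convert an aligned_seq to its cigar line
--
--     The cigar line uses [length][operation] order and if the operation length is 1 it gives the operation only
--     A-TGC---CC --> MD3M3D2M
--
--     Args:
--         aligned_seq: the aligned sequence
--
--     Returns:
--          cigar line
--     """
--     # to construct the cigar string each element of the line is added to the list and then join as a string.
--     # this approach is more performant than using a successive concatenation of strings which runtime scale
--     # quadratically with the length of the string in python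
--     list_cigar = []
--     matches = 0
--     gaps = 0
--     for nt in aligned_seq:
--         if nt == "-":
--             if matches > 0:
--                 list_cigar.append("M" if matches == 1 else f"{matches}M")
--                 matches = 0
--             gaps = gaps + 1
--         else:
--             if gaps > 0:
--                 list_cigar.append("D" if gaps == 1 else f"{gaps}D")
--                 gaps = 0
--             matches = matches + 1
--     ## process the remaining gap/matched after the loop
--     if gaps == 1:
--         list_cigar.append("D")
--     elif gaps > 1:
--         list_cigar.append(f"{gaps}D")
--     elif matches == 1:
--         list_cigar.append("M")
--     elif matches > 1:
--         list_cigar.append(f"{matches}M")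
--
--     return "".join(list_cigar)
-- ===== SOURCE B (Python) =====
-- def aligned_seq_to_cigar(aligned_seq: str) -> str:
--     """Partition the sequence into maximal gap/match runs, map each run to a token."""
--     tokens = []
--     i = 0
--     n = len(aligned_seq)
--     while i < n:
--         gap = aligned_seq[i] == "-"
--         j = i + 1
--         while j < n and (aligned_seq[j] == "-") == gap:
--             j += 1
--         run = j - i
--         op = "D" if gap else "M"
--         tokens.append(op if run == 1 else f"{run}{op}")
--         i = j
--     return "".join(tokens)
-- ===== Notes on version B (the rewrite author's own statement) =====
-- stated objective: alternative
-- what changed: B first partitions the sequence into maximal gap/match runs with an inner scan and maps each whole run to one token, replacing A's per-character state machine with dual counters and a post-loop flush.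
import Mathlib
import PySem

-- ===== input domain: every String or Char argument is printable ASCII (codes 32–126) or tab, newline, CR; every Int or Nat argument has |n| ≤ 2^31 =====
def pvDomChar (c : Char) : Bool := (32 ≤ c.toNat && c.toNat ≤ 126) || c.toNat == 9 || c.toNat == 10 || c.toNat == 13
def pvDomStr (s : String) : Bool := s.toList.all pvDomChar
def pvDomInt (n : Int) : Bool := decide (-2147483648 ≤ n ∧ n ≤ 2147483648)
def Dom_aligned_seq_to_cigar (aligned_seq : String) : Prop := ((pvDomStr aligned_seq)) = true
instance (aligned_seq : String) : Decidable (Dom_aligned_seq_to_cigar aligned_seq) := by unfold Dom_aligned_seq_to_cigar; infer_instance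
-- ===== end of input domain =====

-- B partitions the input into maximal gap/match runs and emits one token per run,
-- instead of A's per-character counter state machine with a post-loop flush (objective: alternative).

-- ===== PORT A =====
-- loop body of A: state (list_cigar, «matches», gaps)
def aStep (st : List String × Nat × Nat) (nt : Char) : List String × Nat × Nat :=
  match st with
  | (list_cigar, «matches», gaps) =>
  if nt == '-' then
    if «matches» > 0 then
      (list_cigar ++ [if «matches» == 1 then "M" else toString «matches» ++ "M"], 0, gaps + 1)
    else
      (list_cigar, «matches», gaps + 1)
  else
    if gaps > 0 then
      (list_cigar ++ [if gaps == 1 then "D" else toString gaps ++ "D"], «matches» + 1, 0)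
    else
      (list_cigar, «matches» + 1, gaps)

-- post-loop flush and join of A
def aFinish (st : List String × Nat × Nat) : String :=
  match st with
  | (list_cigar, «matches», gaps) =>
  String.join
    (if gaps == 1 then list_cigar ++ ["D"]
     else if gaps > 1 then list_cigar ++ [toString gaps ++ "D"]
     else if «matches» == 1 then list_cigar ++ ["M"]
     else if «matches» > 1 then list_cigar ++ [toString «matches» ++ "M"]
     else list_cigar)

def aligned_seq_to_cigar (aligned_seq : String) : String :=
  aFinish (aligned_seq.toList.foldl aStep ([], 0, 0))

-- ===== PORT B =====
-- test used by B's inner scan: does d belong to the current run (gap flag `gap`)?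
def pRun (gap : Bool) (d : Char) : Bool := (d == '-') == gap

-- outer loop of B: take one maximal run, emit its token, continue after it
def altGo : List Char → List String
  | [] => []
  | c :: rest =>
    let gap := c == '-'
    let run := 1 + (rest.takeWhile (pRun gap)).length
    let op := if gap then "D" else "M"
    (if run == 1 then op else toString run ++ op) :: altGo (rest.dropWhile (pRun gap))
termination_by l => l.length
decreasing_by
  simpa using Nat.lt_succ_of_le (List.length_dropWhile_le _ _)

def aligned_seq_to_cigar_alt (aligned_seq : String) : String :=
  String.join (altGo aligned_seq.toList)

-- ===== PRECONDITION & SPEC =====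
def Spec_aligned_seq_to_cigar (aligned_seq : String) (out : String) : Prop := out = aligned_seq_to_cigar_alt aligned_seq
instance (aligned_seq : String) (out : String) : Decidable (Spec_aligned_seq_to_cigar aligned_seq out) := by unfold Spec_aligned_seq_to_cigar; infer_instance

-- ===== CLAIM (what is proved, stated in full; the proofs are below) =====
def Claim_equal_aligned_seq_to_cigar : Prop := ∀ (aligned_seq : String), Dom_aligned_seq_to_cigar aligned_seq → Spec_aligned_seq_to_cigar aligned_seq (aligned_seq_to_cigar aligned_seq)

-- ===== LEMMAS AND PROOFS =====

-- proof-only helpers: B's token list when the loop is entered with m pending «matches»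
-- (the pending «matches» merge with a leading match run of l), resp. g pending gaps.
def altGoM (m : Nat) (l : List Char) : List String :=
  let k := (l.takeWhile (pRun false)).length
  (if m + k == 1 then "M" else toString (m + k) ++ "M") :: altGo (l.dropWhile (pRun false))

def altGoD (g : Nat) (l : List Char) : List String :=
  let k := (l.takeWhile (pRun true)).length
  (if g + k == 1 then "D" else toString (g + k) ++ "D") :: altGo (l.dropWhile (pRun true))

lemma altGo_cons_match (c : Char) (rest : List Char) (hc : ¬ c = '-') :
    altGo (c :: rest) = altGoM 1 rest := by
  have hce : (c == '-') = false := by simpa using hc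
  simp [altGo, altGoM, hce, Nat.add_comm]

lemma altGo_cons_gap (rest : List Char) :
    altGo ('-' :: rest) = altGoD 1 rest := by
  simp [altGo, altGoD, Nat.add_comm]

lemma altGoM_cons_match (m : Nat) (c : Char) (rest : List Char) (hc : ¬ c = '-') :
    altGoM m (c :: rest) = altGoM (m + 1) rest := by
  have hce : (c == '-') = false := by simpa using hc
  have hp : pRun false c = true := by simp [pRun, hce]
  simp only [altGoM, List.takeWhile_cons, List.dropWhile_cons, hp, if_true, List.length_cons]
  have h : m + ((rest.takeWhile (pRun false)).length + 1)
      = m + 1 + (rest.takeWhile (pRun false)).length := by omega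
  rw [h]

lemma altGoM_cons_gap (m : Nat) (rest : List Char) :
    altGoM m ('-' :: rest) = (if m == 1 then "M" else toString m ++ "M") :: altGoD 1 rest := by
  have hp : pRun false '-' = false := by simp [pRun]
  rw [← altGo_cons_gap]
  simp [altGoM, hp]

lemma altGoD_cons_gap (g : Nat) (rest : List Char) :
    altGoD g ('-' :: rest) = altGoD (g + 1) rest := by
  have hp : pRun true '-' = true := by simp [pRun]
  simp only [altGoD, List.takeWhile_cons, List.dropWhile_cons, hp, if_true, List.length_cons]
  have h : g + ((rest.takeWhile (pRun true)).length + 1)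
      = g + 1 + (rest.takeWhile (pRun true)).length := by omega
  rw [h]

lemma altGoD_cons_match (g : Nat) (c : Char) (rest : List Char) (hc : ¬ c = '-') :
    altGoD g (c :: rest) = (if g == 1 then "D" else toString g ++ "D") :: altGoM 1 rest := by
  have hce : (c == '-') = false := by simpa using hc
  have hp : pRun true c = false := by simp [pRun, hce]
  rw [← altGo_cons_match c rest hc]
  simp [altGoD, hp]

-- main invariant: the A-loop started with pending «matches» m > 0 (resp. pending gaps g > 0)
-- and no pending counter of the other kind produces exactly acc followed by B's merged tokens
lemma loop_invariant (l : List Char) :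
    (∀ (acc : List String) (m : Nat), 0 < m →
      aFinish (l.foldl aStep (acc, m, 0)) = String.join (acc ++ altGoM m l)) ∧
    (∀ (acc : List String) (g : Nat), 0 < g →
      aFinish (l.foldl aStep (acc, 0, g)) = String.join (acc ++ altGoD g l)) := by
  induction l with
  | nil =>
    constructor
    · intro acc m hm
      by_cases h1 : m = 1
      · simp [aFinish, altGoM, altGo, h1]
      · have h2 : 1 < m := by omega
        simp [aFinish, altGoM, altGo, h1, h2]
    · intro acc g hg
      by_cases h1 : g = 1
      · simp [aFinish, altGoD, altGo, h1]
      · have h2 : 1 < g := by omega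
        simp [aFinish, altGoD, altGo, h1, h2]
  | cons c rest ih =>
    constructor
    · intro acc m hm
      by_cases hc : c = '-'
      · subst hc
        have hstep : aStep (acc, m, 0) '-'
            = (acc ++ [if m == 1 then "M" else toString m ++ "M"], 0, 1) := by
          simp [aStep, hm]
        rw [List.foldl_cons, hstep, ih.2 _ 1 (by omega), altGoM_cons_gap]
        simp
      · have hce : (c == '-') = false := by simpa using hc
        have hstep : aStep (acc, m, 0) c = (acc, m + 1, 0) := by
          simp [aStep, hce]
        rw [List.foldl_cons, hstep, ih.1 _ (m + 1) (by omega), altGoM_cons_match m c rest hc]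
    · intro acc g hg
      by_cases hc : c = '-'
      · subst hc
        have hstep : aStep (acc, 0, g) '-' = (acc, 0, g + 1) := by
          simp [aStep]
        rw [List.foldl_cons, hstep, ih.2 _ (g + 1) (by omega), altGoD_cons_gap]
      · have hce : (c == '-') = false := by simpa using hc
        have hstep : aStep (acc, 0, g) c
            = (acc ++ [if g == 1 then "D" else toString g ++ "D"], 1, 0) := by
          simp [aStep, hce, hg]
        rw [List.foldl_cons, hstep, ih.1 _ 1 (by omega), altGoD_cons_match g c rest hc]
        simp

-- ===== VERDICT (by name: the statement is the Claim_ definition above) =====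
theorem aligned_seq_to_cigar_spec : Claim_equal_aligned_seq_to_cigar := by
  intro s _
  unfold Spec_aligned_seq_to_cigar aligned_seq_to_cigar aligned_seq_to_cigar_alt
  cases hl : s.toList with
  | nil => simp [aFinish, altGo]
  | cons c rest =>
    by_cases hc : c = '-'
    · subst hc
      have hstep : aStep ([], 0, 0) '-' = ([], 0, 1) := by simp [aStep]
      rw [List.foldl_cons, hstep, (loop_invariant rest).2 [] 1 (by omega), altGo_cons_gap]
      simp
    · have hce : (c == '-') = false := by simpa using hc
      have hstep : aStep ([], 0, 0) c = ([], 1, 0) := by simp [aStep, hce]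
      rw [List.foldl_cons, hstep, (loop_invariant rest).1 [] 1 (by omega), altGo_cons_match c rest hc]
      simp
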